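-- pv_equiv track=rewrite | github.com/maxafinder/Wordle-Solver | pattern.py | get_index_from_pattern
-- ===== SOURCE A (Python) =====
-- def get_index_from_pattern(pattern):
-- 	evaluations = {}
-- 	evaluations["a"] = 0
-- 	evaluations["p"] = 1
-- 	evaluations["c"] = 2
--
-- 	index = 0
-- 	for i in range(0, 5):
-- 		index += evaluations[pattern[i][0]] * pow(3, i)
-- 	return index
-- ===== SOURCE B (Python) =====
-- def get_index_from_pattern(pattern):
-- 	digits = "".join(str("apc".index(pattern[i][0])) for i in range(4, -1, -1))
-- 	return int(digits, 3)
-- ===== Notes on version B (the rewrite author's own statement) =====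
-- stated objective: alternative
-- what changed: Replaces the dict-lookup-and-pow summation loop with two staged passes of a different representation: build the base-3 numeral as a digit STRING using "apc".index (no dict, no arithmetic accumulation), then parse it once with int(digits, 3).
import Mathlib
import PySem

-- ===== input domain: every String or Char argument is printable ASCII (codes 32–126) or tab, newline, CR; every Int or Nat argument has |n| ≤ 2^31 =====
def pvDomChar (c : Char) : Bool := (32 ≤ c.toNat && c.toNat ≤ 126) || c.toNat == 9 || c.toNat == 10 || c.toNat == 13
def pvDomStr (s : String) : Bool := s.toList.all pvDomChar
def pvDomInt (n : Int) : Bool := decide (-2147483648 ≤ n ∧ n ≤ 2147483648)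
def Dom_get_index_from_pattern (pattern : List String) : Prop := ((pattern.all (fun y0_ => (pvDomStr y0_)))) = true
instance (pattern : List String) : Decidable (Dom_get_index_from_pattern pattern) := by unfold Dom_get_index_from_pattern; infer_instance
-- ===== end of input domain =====

-- B replaces A's dict-lookup/pow summation with a different representation: it builds the base-3
-- numeral as a digit string (via "apc".index) and parses it once with int(digits, 3).

-- shared subexpression pattern[i][0] (present verbatim in both sources); the defaults are only
-- reached outside Pre_, where Python raises IndexError
def pvFirst (pattern : List String) (i : Int) : Char :=
  (PySem.Str.pyGet? (PySem.List.pyGetD pattern i "") 0).getD ' '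

-- ===== PORT A =====
-- evaluations[...]: getD's default 0 is only reached outside Pre_ (Python raises KeyError there)
def get_index_from_pattern (pattern : List String) : Int :=
  (PySem.List.pyRange 0 5 1).foldl
    (fun index i =>
      index +
        ((((((PySem.Dict.empty : PySem.Dict String Int).insert "a" 0).insert "p" 1).insert "c" 2) :
            PySem.Dict String Int).getD (String.ofList [pvFirst pattern i]) 0) * 3 ^ i.toNat)
    0

-- ===== PORT B =====
-- "apc".index raises ValueError where PySem.Str.find returns -1, and int(digits, 3) raises
-- ValueError where ofStrBase? is none — both only outside Pre_; exact on Pre_.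
def get_index_from_pattern_alt (pattern : List String) : Int :=
  (PySem.Int.ofStrBase?
      (PySem.Str.join ""
        ((PySem.List.pyRange 4 (-1) (-1)).map
          (fun i => PySem.Int.toStr (PySem.Str.find "apc" (String.ofList [pvFirst pattern i])))))
      3).getD 0

-- ===== PRECONDITION & SPEC =====
-- Pre_: the first five entries exist, are nonempty, and start with 'a'/'p'/'c' — exactly the
-- inputs on which Python A raises no IndexError/KeyError.
def Pre_get_index_from_pattern (pattern : List String) : Prop :=
  5 ≤ pattern.length ∧
  ∀ i : Nat, i < 5 →
    (pattern.getD i "").toList.head? = some 'a' ∨ (pattern.getD i "").toList.head? = some 'p' ∨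
    (pattern.getD i "").toList.head? = some 'c'
instance (pattern : List String) : Decidable (Pre_get_index_from_pattern pattern) := by
  unfold Pre_get_index_from_pattern; infer_instance

def pvWitness_get_index_from_pattern : List String := ["a", "p", "c", "a", "c"]

def Spec_get_index_from_pattern (pattern : List String) (out : Int) : Prop := out = get_index_from_pattern_alt pattern
instance (pattern : List String) (out : Int) : Decidable (Spec_get_index_from_pattern pattern out) := by unfold Spec_get_index_from_pattern; infer_instance

-- ===== CLAIM (what is proved, stated in full; the proofs are below) =====
def Claim_equal_get_index_from_pattern : Prop := ∀ (pattern : List String), Dom_get_index_from_pattern pattern → Pre_get_index_from_pattern pattern → Spec_get_index_from_pattern pattern (get_index_from_pattern pattern)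

-- ===== LEMMAS AND PROOFS =====
theorem pvRange_up : PySem.List.pyRange 0 5 1 = [0, 1, 2, 3, 4] := by decide
theorem pvRange_down : PySem.List.pyRange 4 (-1) (-1) = [4, 3, 2, 1, 0] := by decide

theorem pvFirst_eq (p0 p1 p2 p3 p4 : String) (rest : List String) (i : Int)
    (h0i : 0 ≤ i) (h5 : i < 5)
    (c : Char) (h : ([p0, p1, p2, p3, p4].getD i.toNat "").toList.head? = some c) :
    pvFirst (p0 :: p1 :: p2 :: p3 :: p4 :: rest) i = c := by
  obtain ⟨n, rfl⟩ : ∃ n : Nat, i = (n : Int) := ⟨i.toNat, (Int.toNat_of_nonneg h0i).symm⟩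
  unfold pvFirst
  rw [PySem.List.pyGetD_natCast]
  have h5' : n < 5 := by exact_mod_cast h5
  have hgetD : (p0 :: p1 :: p2 :: p3 :: p4 :: rest).getD n "" = [p0, p1, p2, p3, p4].getD n "" := by
    interval_cases n <;> rfl
  rw [hgetD]
  rw [show ((0 : Int)) = ((0 : Nat) : Int) by norm_num, PySem.Str.pyGet?_natCast]
  simp only [Int.toNat_natCast] at h
  have hl : ([p0, p1, p2, p3, p4].getD n "").toList =
      c :: ([p0, p1, p2, p3, p4].getD n "").toList.tail := by
    cases hcase : ([p0, p1, p2, p3, p4].getD n "").toList with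
    | nil => rw [hcase] at h; simp at h
    | cons x t =>
        rw [hcase] at h; simp only [List.head?_cons, Option.some.injEq] at h
        rw [h, List.tail_cons]
  rw [hl]
  rfl

-- ===== VERDICT (by name: the statement is the Claim_ definition above) =====
theorem get_index_from_pattern_spec : Claim_equal_get_index_from_pattern := by
  intro pattern _ hpre
  obtain ⟨hlen, hch⟩ := hpre
  rcases pattern with _ | ⟨p0, _ | ⟨p1, _ | ⟨p2, _ | ⟨p3, _ | ⟨p4, rest⟩⟩⟩⟩⟩ <;>
    simp only [List.length] at hlen <;> try omega
  have h0 := hch 0 (by omega); have h1 := hch 1 (by omega); have h2 := hch 2 (by omega)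
  have h3 := hch 3 (by omega); have h4 := hch 4 (by omega)
  simp only [List.getD, List.getElem?_cons_zero, List.getElem?_cons_succ, Option.getD_some] at h0 h1 h2 h3 h4
  unfold Spec_get_index_from_pattern get_index_from_pattern get_index_from_pattern_alt
  rw [pvRange_up, pvRange_down]
  simp only [List.foldl, List.map]
  rcases h0 with h0 | h0 | h0 <;> rcases h1 with h1 | h1 | h1 <;> rcases h2 with h2 | h2 | h2 <;>
    rcases h3 with h3 | h3 | h3 <;> rcases h4 with h4 | h4 | h4 <;>
    rw [pvFirst_eq p0 p1 p2 p3 p4 rest 0 (by omega) (by omega) _ h0,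
        pvFirst_eq p0 p1 p2 p3 p4 rest 1 (by omega) (by omega) _ h1,
        pvFirst_eq p0 p1 p2 p3 p4 rest 2 (by omega) (by omega) _ h2,
        pvFirst_eq p0 p1 p2 p3 p4 rest 3 (by omega) (by omega) _ h3,
        pvFirst_eq p0 p1 p2 p3 p4 rest 4 (by omega) (by omega) _ h4] <;>
    decide
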